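-- pv_equiv track=rewrite | github.com/senaKash/ats-candidate-matching-experiment | parser_hr_dataset_v3_fixed.py | extract_vacancy_title
-- ===== SOURCE A (Python) =====
-- VACANCY_NOISE_PREFIXES = (
--     "job description", "responsibilities", "requirements", "required skills",
--     "preferred skills", "about us", "about the company", "location",
--     "employment type", "salary", "we offer", "what we offer"
-- )
--
-- def is_vacancy_noise_line(line: str) -> bool:
--     s = (line or "").strip().lower()
--     if not s:
--         return True
--     return any(s.startswith(prefix) for prefix in VACANCY_NOISE_PREFIXES)
--
-- def looks_like_vacancy_title(line: str) -> bool: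
--     s = (line or "").strip()
--     low = s.lower()
--     if not s or len(s) > 120:
--         return False
--     if is_vacancy_noise_line(s):
--         return False
--     return any(x in low for x in (
--         "developer", "engineer", "architect", "analyst", "manager",
--         "designer", "scientist", "qa", "devops", "administrator",
--         ".net", "backend", "frontend", "full stack", "fullstack"
--     ))
--
-- def extract_vacancy_title(lines: list[str]) -> str:
--     for line in lines[:20]:
--         line = line.strip()
--         if not line or is_vacancy_noise_line(line):
--             continue
--         if looks_like_vacancy_title(line):
--             return line
--     for line in lines[:20]:
--         line = line.strip()
--         if line and not is_vacancy_noise_line(line):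
--             return line
--     return ""
-- ===== SOURCE B (Python) =====
-- VACANCY_NOISE_PREFIXES = (
--     "job description", "responsibilities", "requirements", "required skills",
--     "preferred skills", "about us", "about the company", "location",
--     "employment type", "salary", "we offer", "what we offer"
-- )
--
-- def is_vacancy_noise_line(line: str) -> bool:
--     s = (line or "").strip().lower()
--     if not s:
--         return True
--     return any(s.startswith(prefix) for prefix in VACANCY_NOISE_PREFIXES)
--
-- def looks_like_vacancy_title(line: str) -> bool:
--     s = (line or "").strip()
--     low = s.lower()
--     if not s or len(s) > 120:
--         return False
--     if is_vacancy_noise_line(s):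
--         return False
--     return any(x in low for x in (
--         "developer", "engineer", "architect", "analyst", "manager",
--         "designer", "scientist", "qa", "devops", "administrator",
--         ".net", "backend", "frontend", "full stack", "fullstack"
--     ))
--
-- def extract_vacancy_title(lines: list[str]) -> str:
--     fallback = None
--     for line in lines[:20]:
--         line = line.strip()
--         if not line or is_vacancy_noise_line(line):
--             continue
--         if looks_like_vacancy_title(line):
--             return line
--         if fallback is None:
--             fallback = line
--     return fallback if fallback is not None else ""
-- ===== Notes on version B (the rewrite author's own statement) =====
-- stated objective: alternative
-- what changed: Replaced A's two sequential scans of lines[:20] (one for a title, one for a fallback) by a single pass that returns a title immediately and records the first non-noise line as fallback.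
import Mathlib
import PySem

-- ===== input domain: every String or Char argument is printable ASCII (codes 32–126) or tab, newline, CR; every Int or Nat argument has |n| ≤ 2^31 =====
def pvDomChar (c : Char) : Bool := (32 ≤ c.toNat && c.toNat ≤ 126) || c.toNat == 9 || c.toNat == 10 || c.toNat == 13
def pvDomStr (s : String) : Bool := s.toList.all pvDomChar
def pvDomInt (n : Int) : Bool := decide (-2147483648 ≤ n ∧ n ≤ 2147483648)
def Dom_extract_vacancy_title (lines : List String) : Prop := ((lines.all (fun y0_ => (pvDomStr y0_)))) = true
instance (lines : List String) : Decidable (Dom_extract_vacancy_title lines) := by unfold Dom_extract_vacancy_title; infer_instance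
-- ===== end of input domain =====

-- B merges A's two sequential scans of lines[:20] into one pass with a fallback accumulator (objective: alternative decomposition; return value identical).

-- ===== PORT A =====
-- module-level helpers, shared by both Pythons
def VACANCY_NOISE_PREFIXES : List String :=
  ["job description", "responsibilities", "requirements", "required skills",
   "preferred skills", "about us", "about the company", "location",
   "employment type", "salary", "we offer", "what we offer"]

def is_vacancy_noise_line (line : String) : Bool :=
  let s := PySem.Str.lower (PySem.Str.strip line)
  if s = "" then true
  else VACANCY_NOISE_PREFIXES.any (fun p => PySem.Str.startswith s p)

def TITLE_KEYWORDS : List String :=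
  ["developer", "engineer", "architect", "analyst", "manager",
   "designer", "scientist", "qa", "devops", "administrator",
   ".net", "backend", "frontend", "full stack", "fullstack"]

def looks_like_vacancy_title (line : String) : Bool :=
  let s := PySem.Str.strip line
  let low := PySem.Str.lower s
  if s = "" || 120 < PySem.Str.len s then false
  else if is_vacancy_noise_line s then false
  else TITLE_KEYWORDS.any (fun x => PySem.Str.isIn x low)

-- A's first loop: return the first title line (early return → Option)
def evtLoop1 : List String → Option String
  | [] => none
  | l :: ls =>
    let line := PySem.Str.strip l
    if line = "" || is_vacancy_noise_line line then evtLoop1 ls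
    else if looks_like_vacancy_title line then some line
    else evtLoop1 ls

-- A's second loop: return the first non-empty, non-noise line, else ""
def evtLoop2 : List String → String
  | [] => ""
  | l :: ls =>
    let line := PySem.Str.strip l
    if line ≠ "" && !is_vacancy_noise_line line then line
    else evtLoop2 ls

def extract_vacancy_title (lines : List String) : String :=
  let first20 := PySem.List.slice lines none (some 20)
  match evtLoop1 first20 with
  | some t => t
  | none => evtLoop2 first20

-- ===== PORT B =====
-- B's single loop: skip empty/noise, return a title at once, else record the first fallback
def evtLoopB : List String → Option String → String
  | [], fallback => match fallback with | some f => f | none => ""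
  | l :: ls, fallback =>
    let line := PySem.Str.strip l
    if line = "" || is_vacancy_noise_line line then evtLoopB ls fallback
    else if looks_like_vacancy_title line then line
    else evtLoopB ls (if fallback.isNone then some line else fallback)

def extract_vacancy_title_alt (lines : List String) : String :=
  evtLoopB (PySem.List.slice lines none (some 20)) none

-- ===== PRECONDITION & SPEC =====
def Spec_extract_vacancy_title (lines : List String) (out : String) : Prop := out = extract_vacancy_title_alt lines
instance (lines : List String) (out : String) : Decidable (Spec_extract_vacancy_title lines out) := by unfold Spec_extract_vacancy_title; infer_instance

-- ===== CLAIM (what is proved, stated in full; the proofs are below) =====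
def Claim_equal_extract_vacancy_title : Prop := ∀ (lines : List String), Dom_extract_vacancy_title lines → Spec_extract_vacancy_title lines (extract_vacancy_title lines)

-- ===== LEMMAS AND PROOFS =====

-- Loop invariant: the one-pass loop with a pending fallback equals A's two-loop result,
-- the pending fallback taking precedence over anything the second loop would find later.
theorem evtLoopB_eq (xs : List String) :
    ∀ fb : Option String,
      evtLoopB xs fb =
        match evtLoop1 xs with
        | some t => t
        | none => match fb with | some f => f | none => evtLoop2 xs := by
  induction xs with
  | nil => intro fb; cases fb <;> simp [evtLoopB, evtLoop1, evtLoop2]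
  | cons l ls ih =>
    intro fb
    simp only [evtLoopB, evtLoop1, evtLoop2]
    by_cases h1 : PySem.Str.strip l = "" ∨ is_vacancy_noise_line (PySem.Str.strip l) = true
    · have h1' : (PySem.Str.strip l = "" || is_vacancy_noise_line (PySem.Str.strip l)) = true := by
        simp [h1]
      simp only [h1', if_true, ih fb]
      rcases h1 with h | h <;> simp [h]
    · push Not at h1
      obtain ⟨he, hn⟩ := h1
      have hn' : is_vacancy_noise_line (PySem.Str.strip l) = false := by
        simpa using hn
      have h1' : (PySem.Str.strip l = "" || is_vacancy_noise_line (PySem.Str.strip l)) = false := by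
        simp [he, hn']
      simp only [h1']
      by_cases ht : looks_like_vacancy_title (PySem.Str.strip l) = true
      · simp [ht]
      · have ht' : looks_like_vacancy_title (PySem.Str.strip l) = false := by simpa using ht
        simp only [ht', ih]
        have h2 : (PySem.Str.strip l ≠ "" && !is_vacancy_noise_line (PySem.Str.strip l)) = true := by
          simp [he, hn']
        simp only [h2, if_true]
        cases fb <;> simp

-- ===== VERDICT (by name: the statement is the Claim_ definition above) =====
theorem extract_vacancy_title_spec : Claim_equal_extract_vacancy_title := by
  intro lines _
  unfold Spec_extract_vacancy_title extract_vacancy_title extract_vacancy_title_alt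
  rw [evtLoopB_eq]
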